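-- pv_equiv track=rewrite | github.com/parsaabadi/OpenMPP_Model_Integration- | fix_hpvmm_oncosim_dimensions.py | apply_hpv_type_mappings
-- ===== SOURCE A (Python) =====
-- def apply_hpv_type_mappings(content):
--     mappings = {
--         'Type_6': 'HPV_6',
--         'Type_11': 'HPV_11',
--         'Type_16': 'HPV_16',
--         'Type_18': 'HPV_18',
--         'Other_carcinogenic_HPV_types': 'HPV_OTHER_CANCEROUS',
--         'Other_non_carcinogenic_HPV_types': 'HPV_OTHER_NON_CANCEROUS'
--     }
--
--     for old, new in mappings.items():
--         content = content.replace(old, new)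
--     return content
-- ===== SOURCE B (Python) =====
-- import re
--
-- def apply_hpv_type_mappings(content):
--     mappings = {
--         'Type_6': 'HPV_6',
--         'Type_11': 'HPV_11',
--         'Type_16': 'HPV_16',
--         'Type_18': 'HPV_18',
--         'Other_carcinogenic_HPV_types': 'HPV_OTHER_CANCEROUS',
--         'Other_non_carcinogenic_HPV_types': 'HPV_OTHER_NON_CANCEROUS'
--     }
--     pattern = re.compile('|'.join(map(re.escape, mappings)))
--     return pattern.sub(lambda m: mappings[m.group(0)], content)
-- ===== Notes on version B (the rewrite author's own statement) =====
-- stated objective: idiomatic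
-- what changed: A makes six sequential full-text str.replace passes (one per mapping); B compiles one regex alternation from the mapping keys and rewrites the text in a single left-to-right pass with re.sub driven by the dict lookup.
import Mathlib
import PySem

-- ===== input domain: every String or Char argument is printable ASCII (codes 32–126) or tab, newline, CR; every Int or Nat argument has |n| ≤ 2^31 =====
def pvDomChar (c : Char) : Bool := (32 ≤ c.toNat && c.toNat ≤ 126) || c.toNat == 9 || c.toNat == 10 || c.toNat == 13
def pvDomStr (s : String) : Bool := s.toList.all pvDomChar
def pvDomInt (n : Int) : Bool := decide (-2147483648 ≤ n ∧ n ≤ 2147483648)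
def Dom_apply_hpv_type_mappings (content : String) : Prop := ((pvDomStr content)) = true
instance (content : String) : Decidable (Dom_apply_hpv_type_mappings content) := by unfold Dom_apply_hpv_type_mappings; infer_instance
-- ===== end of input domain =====

-- B replaces A's six sequential full-text str.replace passes by one regex-alternation
-- driven left-to-right pass (objective: idiomatic single-pass rewrite; same return value).

-- ===== PORT A =====
-- A: build the mappings dict, then for each (old, new) in insertion order do a full
-- content.replace(old, new) pass.
def apply_hpv_type_mappings (content : String) : String :=
  ((PySem.Dict.ofList
      [("Type_6", "HPV_6"), ("Type_11", "HPV_11"), ("Type_16", "HPV_16"),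
       ("Type_18", "HPV_18"), ("Other_carcinogenic_HPV_types", "HPV_OTHER_CANCEROUS"),
       ("Other_non_carcinogenic_HPV_types", "HPV_OTHER_NON_CANCEROUS")]).items).foldl
    (fun content p => PySem.Str.replace content p.1 p.2) content

-- ===== PORT B =====
-- B-side helper: the (key, value) pairs, in the order the keys appear in the alternation
-- '|'.join(map(re.escape, mappings)); the value paired with a key is mappings[key].
def pvPairs : List (List Char × List Char) :=
  [("Type_6".toList, "HPV_6".toList), ("Type_11".toList, "HPV_11".toList),
   ("Type_16".toList, "HPV_16".toList), ("Type_18".toList, "HPV_18".toList),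
   ("Other_carcinogenic_HPV_types".toList, "HPV_OTHER_CANCEROUS".toList),
   ("Other_non_carcinogenic_HPV_types".toList, "HPV_OTHER_NON_CANCEROUS".toList)]

-- hand port of pattern.sub(lambda m: mappings[m.group(0)], content) for an alternation of
-- literal (re.escape'd) keys: exact here — the regex engine scans left to right, at each
-- position tries the alternatives in pattern order, replaces the first that matches with
-- its mapped value and resumes after the match, copying unmatched characters unchanged.
def pvSub (l : List Char) : List Char :=
  match l with
  | [] => []
  | c :: t =>
    match pvPairs.find? (fun p => p.1.isPrefixOf (c :: t)) with
    | some p => p.2 ++ pvSub (List.drop (p.1.length - 1) t)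
    | none => c :: pvSub t
termination_by l.length
decreasing_by
  · simpa using Nat.lt_succ_of_le (List.length_drop_le _ _)
  · simp

def apply_hpv_type_mappings_alt (content : String) : String :=
  String.ofList (pvSub content.toList)

-- ===== PRECONDITION & SPEC =====
def Spec_apply_hpv_type_mappings (content : String) (out : String) : Prop := out = apply_hpv_type_mappings_alt content
instance (content : String) (out : String) : Decidable (Spec_apply_hpv_type_mappings content out) := by unfold Spec_apply_hpv_type_mappings; infer_instance

-- ===== CLAIM (what is proved, stated in full; the proofs are below) =====
def Claim_equal_apply_hpv_type_mappings : Prop := ∀ (content : String), Dom_apply_hpv_type_mappings content → Spec_apply_hpv_type_mappings content (apply_hpv_type_mappings content)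

-- ===== LEMMAS AND PROOFS =====

-- proof-side model of one str.replace pass (clean structural recursion over the text)
def pvRepl (k v : List Char) : List Char → List Char
  | [] => []
  | c :: t => if k.isPrefixOf (c :: t) then v ++ pvRepl k v (List.drop (k.length - 1) t)
              else c :: pvRepl k v t
termination_by l => l.length
decreasing_by
  · simpa using Nat.lt_succ_of_le (List.length_drop_le _ _)
  · simp

-- pvSafe a b: no nonempty suffix of a is a prefix of b nor an extension of b,
-- so no b-match can start at or inside an a-block
def pvSafe (a b : List Char) : Bool :=
  a.tails.all (fun q => q.isEmpty || (!(b.isPrefixOf q) && !(q.isPrefixOf b)))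

-- the non-interference relation between an earlier pair p and a later pair q
def pvRel (p q : List Char × List Char) : Prop :=
  pvSafe q.1 p.1 = true ∧ pvSafe p.2 q.1 = true ∧ pvSafe q.1 p.2 = true

-- A's composite: the sequential replace passes, one per pair
def pvComp (ps : List (List Char × List Char)) (l : List Char) : List Char :=
  ps.foldl (fun acc p => pvRepl p.1 p.2 acc) l

theorem pvRepl_nil (k v : List Char) : pvRepl k v [] = [] := by simp [pvRepl]

theorem pvRepl_neg (k v : List Char) (c : Char) (t : List Char) (h : ¬ k <+: (c :: t)) :
    pvRepl k v (c :: t) = c :: pvRepl k v t := by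
  rw [pvRepl, if_neg (by simpa [List.isPrefixOf_iff_prefix] using h)]

theorem pvRepl_pos (k v : List Char) (c : Char) (t : List Char) (h : k <+: (c :: t)) :
    pvRepl k v (c :: t) = v ++ pvRepl k v (List.drop (k.length - 1) t) := by
  rw [pvRepl, if_pos (by simpa [List.isPrefixOf_iff_prefix] using h)]

theorem pvPrefixSplit {k p x : List Char} (h : k <+: p ++ x) : k <+: p ∨ p <+: k :=
  List.prefix_or_prefix_of_prefix h (List.prefix_append p x)

theorem pvSafe_spec {a b q : List Char} (h : pvSafe a b = true) (hq : q <:+ a) (hne : q ≠ []) :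
    ¬ b <+: q ∧ ¬ q <+: b := by
  have := (List.all_eq_true.mp h) q ((List.mem_tails q a).mpr hq)
  simp only [Bool.or_eq_true, Bool.and_eq_true, Bool.not_eq_true'] at this
  rcases this with h1 | ⟨h2, h3⟩
  · exact absurd (List.isEmpty_iff.mp h1) hne
  · refine ⟨fun hp => ?_, fun hp => ?_⟩
    · rw [← List.isPrefixOf_iff_prefix] at hp; simp [hp] at h2
    · rw [← List.isPrefixOf_iff_prefix] at hp; simp [hp] at h3

theorem pvSafe_tail {c : Char} {a b : List Char} (h : pvSafe (c :: a) b = true) :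
    pvSafe a b = true := by
  unfold pvSafe at *
  rw [List.tails_cons, List.all_cons] at h
  exact Bool.and_elim_right h

-- a replace pass walks through a Safe prefix untouched
theorem pvRepl_pass {k v p : List Char} (x : List Char) (h : pvSafe p k = true) :
    pvRepl k v (p ++ x) = p ++ pvRepl k v x := by
  induction p with
  | nil => rfl
  | cons c p ih =>
    have hw := pvSafe_spec h (List.suffix_refl _) (by simp)
    have hnp : ¬ k <+: (c :: p) ++ x := by
      intro hk
      rcases pvPrefixSplit hk with h' | h'
      · exact hw.1 h'
      · exact hw.2 h'
    rw [List.cons_append, pvRepl_neg _ _ _ _ (by simpa using hnp), ih (pvSafe_tail h)]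
    simp

theorem pvRepl_match {k v : List Char} (x : List Char) (hk : k ≠ []) :
    pvRepl k v (k ++ x) = v ++ pvRepl k v x := by
  obtain ⟨c, k', rfl⟩ := List.exists_cons_of_ne_nil hk
  rw [List.cons_append, pvRepl_pos _ _ _ _ ⟨x, rfl⟩]
  simp

-- replacing k by v cannot create a fresh head match of any nonempty suffix q of k2
theorem pvNoCreate {k v k2 : List Char} (hs : pvSafe k2 v = true) :
    ∀ s q, q <:+ k2 → q ≠ [] → ¬ q <+: s → ¬ q <+: pvRepl k v s := by
  intro s
  induction s with
  | nil => intro q _ hne _ h; rw [pvRepl_nil] at h; exact hne (List.prefix_nil.mp h)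
  | cons c t ih =>
    intro q hq hne hns hcontra
    by_cases hk : k <+: (c :: t)
    · rw [pvRepl_pos _ _ _ _ hk] at hcontra
      have hw := pvSafe_spec hs hq hne
      rcases pvPrefixSplit hcontra with h' | h'
      · exact hw.2 h'
      · exact hw.1 h'
    · rw [pvRepl_neg _ _ _ _ hk] at hcontra
      obtain ⟨c', q', rfl⟩ := List.exists_cons_of_ne_nil hne
      rcases List.cons_prefix_cons.mp hcontra with ⟨rfl, hq'⟩
      by_cases hq'e : q' = []
      · subst hq'e
        exact hns (List.cons_prefix_cons.mpr ⟨rfl, List.nil_prefix⟩)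
      · exact ih q' (List.IsSuffix.trans (List.suffix_cons _ _) hq) hq'e
          (fun hp => hns (List.cons_prefix_cons.mpr ⟨rfl, hp⟩)) hq'

theorem pvComp_nil (ps : List (List Char × List Char)) : pvComp ps [] = [] := by
  induction ps with
  | nil => rfl
  | cons p ps ih => simpa [pvComp, pvRepl_nil] using ih

theorem pvComp_cons (p : List Char × List Char) (ps : List (List Char × List Char))
    (l : List Char) : pvComp (p :: ps) l = pvComp ps (pvRepl p.1 p.2 l) := rfl

theorem pvComp_pass {ps : List (List Char × List Char)} {v : List Char} (w : List Char)
    (h : ∀ r ∈ ps, pvSafe v r.1 = true) : pvComp ps (v ++ w) = v ++ pvComp ps w := by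
  induction ps generalizing w with
  | nil => rfl
  | cons r ps ih =>
    rw [pvComp_cons, pvRepl_pass w (h r (List.mem_cons_self)),
      ih _ (fun r' hr' => h r' (List.mem_cons_of_mem _ hr')), pvComp_cons]

-- when the text starts with the key of some pair, the composite replaces it and moves on
theorem pvComp_match {pre post : List (List Char × List Char)} {p : List Char × List Char}
    (x : List Char) (hpw : List.Pairwise pvRel (pre ++ p :: post)) (hk : p.1 ≠ []) :
    pvComp (pre ++ p :: post) (p.1 ++ x) = p.2 ++ pvComp (pre ++ p :: post) x := by
  induction pre generalizing x with
  | nil =>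
    rw [List.nil_append, pvComp_cons, pvRepl_match x hk, pvComp_cons]
    have hpost := List.pairwise_cons.mp hpw
    exact pvComp_pass _ (fun r hr => ((hpost.1 r hr).2).1)
  | cons q pre ih =>
    have hpw' := List.pairwise_cons.mp (show List.Pairwise pvRel (q :: (pre ++ p :: post)) from hpw)
    have hrel : pvRel q p := hpw'.1 p (by simp)
    rw [List.cons_append, pvComp_cons, pvRepl_pass _ hrel.1, ih _ hpw'.2, pvComp_cons]

-- when no key matches at the head, the composite copies the head character
theorem pvComp_none {ps : List (List Char × List Char)} {c : Char} {t : List Char}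
    (hpw : List.Pairwise pvRel ps) (hne : ∀ r ∈ ps, r.1 ≠ [])
    (h : ∀ r ∈ ps, ¬ r.1 <+: (c :: t)) :
    pvComp ps (c :: t) = c :: pvComp ps t := by
  induction ps generalizing t with
  | nil => rfl
  | cons q ps ih =>
    have hpw' := List.pairwise_cons.mp hpw
    have hq : ¬ q.1 <+: (c :: t) := h q List.mem_cons_self
    rw [pvComp_cons, pvRepl_neg _ _ _ _ hq, pvComp_cons]
    refine ih hpw'.2 (fun r hr => hne r (List.mem_cons_of_mem _ hr)) (fun r hr hcontra => ?_)
    have : ¬ r.1 <+: pvRepl q.1 q.2 (c :: t) :=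
      pvNoCreate ((hpw'.1 r hr).2).2 (c :: t) r.1 (List.suffix_refl _)
        (hne r (List.mem_cons_of_mem _ hr)) (h r (List.mem_cons_of_mem _ hr))
    rw [pvRepl_neg _ _ _ _ hq] at this
    exact this hcontra

theorem pvPairs_keys_ne : ∀ r ∈ pvPairs, r.1 ≠ [] := by decide

theorem pvPairs_pairwise : List.Pairwise pvRel pvPairs := by
  rw [pvPairs]
  norm_num [List.pairwise_cons, pvRel]
  decide

-- the six sequential passes compute exactly the single alternation-driven pass
theorem pvMain : ∀ n l, l.length ≤ n → pvComp pvPairs l = pvSub l := by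
  intro n
  induction n with
  | zero =>
    intro l hl
    rw [List.length_eq_zero_iff.mp (Nat.le_zero.mp hl)]
    rw [pvComp_nil, pvSub]
  | succ n ih =>
    intro l hl
    match l with
    | [] => rw [pvComp_nil, pvSub]
    | c :: t =>
      cases hf : pvPairs.find? (fun p => p.1.isPrefixOf (c :: t)) with
      | none =>
        have hnone : ∀ r ∈ pvPairs, ¬ r.1 <+: (c :: t) := by
          intro r hr hcontra
          have := List.find?_eq_none.mp hf r hr
          rw [← List.isPrefixOf_iff_prefix] at hcontra
          simp [hcontra] at this
        rw [pvComp_none pvPairs_pairwise pvPairs_keys_ne hnone, pvSub, hf]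
        simp only [List.length_cons, Nat.succ_le_succ_iff] at hl
        rw [ih t hl]
      | some p =>
        have hmem : p ∈ pvPairs := List.mem_of_find?_eq_some hf
        have hprefix : p.1 <+: (c :: t) := by
          have := List.find?_some hf
          rwa [← List.isPrefixOf_iff_prefix]
        obtain ⟨x, hx⟩ := hprefix
        obtain ⟨pre, post, hsplit⟩ := List.append_of_mem hmem
        have hk : p.1 ≠ [] := pvPairs_keys_ne p hmem
        obtain ⟨c0, k', hp1⟩ := List.exists_cons_of_ne_nil hk
        have hct : c0 :: (k' ++ x) = c :: t := by rw [← hx, hp1]; simp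
        have ht : k' ++ x = t := by injection hct
        have hdrop : List.drop (p.1.length - 1) t = x := by
          rw [hp1, ← ht]; simp
        have hxlen : x.length ≤ n := by
          have h1 : (c :: t).length ≤ n + 1 := hl
          have h2 : x.length ≤ t.length := by rw [← ht]; simp
          simp only [List.length_cons, Nat.succ_le_succ_iff] at h1
          omega
        calc pvComp pvPairs (c :: t)
            = pvComp (pre ++ p :: post) (p.1 ++ x) := by rw [hx, ← hsplit]
          _ = p.2 ++ pvComp (pre ++ p :: post) x := pvComp_match x (hsplit ▸ pvPairs_pairwise) hk
          _ = p.2 ++ pvSub x := by rw [← hsplit, ih x hxlen]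
          _ = pvSub (c :: t) := by rw [pvSub, hf]; simp [hdrop]

-- PySem.Chars.replace (with a nonempty pattern) is the structural pass pvRepl
theorem pvGo (old new : List Char) (hold : old ≠ []) :
    ∀ fuel l acc, l.length ≤ fuel →
      PySem.Chars.replace.go old new fuel l acc = acc.reverse ++ pvRepl old new l := by
  intro fuel
  induction fuel with
  | zero =>
    intro l acc hl
    rw [List.length_eq_zero_iff.mp (Nat.le_zero.mp hl)]
    simp [PySem.Chars.replace.go, pvRepl]
  | succ n ih =>
    intro l acc hl
    match l with
    | [] => simp [PySem.Chars.replace.go, pvRepl]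
    | c :: t =>
      obtain ⟨d, old', rfl⟩ := List.exists_cons_of_ne_nil hold
      rw [PySem.Chars.replace.go]
      by_cases h : (d :: old').isPrefixOf (c :: t)
      · rw [if_pos h, pvRepl, if_pos h]
        have hlen : (List.drop (d :: old').length (c :: t)).length ≤ n := by
          simp at hl ⊢; omega
        rw [ih _ _ hlen]
        simp [List.drop_succ_cons]
      · rw [if_neg h, pvRepl, if_neg h]
        have hlen : t.length ≤ n := by simp at hl; omega
        rw [ih _ _ hlen]
        simp

theorem pvReplace_eq (s old new : List Char) (hold : old ≠ []) :
    PySem.Chars.replace s old new = pvRepl old new s := by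
  rw [PySem.Chars.replace, if_neg (by simpa [List.isEmpty_iff] using hold)]
  simpa using pvGo old new hold s.length s [] le_rfl

theorem pvA_toList (content : String) :
    (apply_hpv_type_mappings content).toList = pvComp pvPairs content.toList := by
  rw [apply_hpv_type_mappings]
  have hitems : (PySem.Dict.ofList
      [("Type_6", "HPV_6"), ("Type_11", "HPV_11"), ("Type_16", "HPV_16"),
       ("Type_18", "HPV_18"), ("Other_carcinogenic_HPV_types", "HPV_OTHER_CANCEROUS"),
       ("Other_non_carcinogenic_HPV_types", "HPV_OTHER_NON_CANCEROUS")]).items =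
      [("Type_6", "HPV_6"), ("Type_11", "HPV_11"), ("Type_16", "HPV_16"),
       ("Type_18", "HPV_18"), ("Other_carcinogenic_HPV_types", "HPV_OTHER_CANCEROUS"),
       ("Other_non_carcinogenic_HPV_types", "HPV_OTHER_NON_CANCEROUS")] := by decide
  rw [hitems]
  simp only [List.foldl, PySem.Str.replace, String.toList_ofList]
  rw [pvReplace_eq _ _ _ (by decide), pvReplace_eq _ _ _ (by decide),
    pvReplace_eq _ _ _ (by decide), pvReplace_eq _ _ _ (by decide),
    pvReplace_eq _ _ _ (by decide), pvReplace_eq _ _ _ (by decide)]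
  rfl

-- ===== VERDICT (by name: the statement is the Claim_ definition above) =====
theorem apply_hpv_type_mappings_spec : Claim_equal_apply_hpv_type_mappings := by
  intro content _
  unfold Spec_apply_hpv_type_mappings apply_hpv_type_mappings_alt
  apply String.toList_inj.mp
  rw [pvA_toList, String.toList_ofList]
  exact pvMain content.toList.length content.toList le_rfl
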